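-- pv_equiv track=rewrite | github.com/yangsenLu1999/badou-ai-special-2024 | 30-谭有为/第十四周作业/faster-r-cnn/CONV_RPN_IOU_CreateAnchor.py | create_train_anchor
-- ===== SOURCE A (Python) =====
-- FEATURE_STRIDE=16   ##特征图相对于原始输入图像的缩小的倍数, 如果用 VGG16 作为特征提取网络就是 16
--
-- def create_train_anchor(feature_size,base_anchors,stride=FEATURE_STRIDE):
--     anchors=[]
--     for r in range(feature_size[0]):
--         for c in range(feature_size[1]):
--             for a in base_anchors:
--                 anchors.append([
--                     c*stride+stride//2+a[0],
--                     r*stride+stride//2+a[1],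
--                     c*stride+stride//2+a[2],
--                     r*stride+stride//2+a[3]
--                 ])
--     return anchors
-- ===== SOURCE B (Python) =====
-- FEATURE_STRIDE = 16
--
-- def create_train_anchor(feature_size, base_anchors, stride=FEATURE_STRIDE):
--     rows, cols = feature_size[0], feature_size[1]
--     n = len(base_anchors)
--     if rows <= 0 or cols <= 0 or n == 0:
--         return []
--     half = stride // 2
--     total = rows * cols * n
--     out = []
--     i = 0
--     while i < total:
--         rest, k = divmod(i, n)
--         r, c = divmod(rest, cols)
--         a = base_anchors[k]
--         x = c * stride + half
--         y = r * stride + half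
--         out.append([x + a[0], y + a[1], x + a[2], y + a[3]])
--         i += 1
--     return out
-- ===== Notes on version B (the rewrite author's own statement) =====
-- stated objective: alternative
-- what changed: Replaces A's three nested for-loops by a single flat while loop over one index 0..rows*cols*len(base_anchors) that decodes the row, column and anchor number arithmetically with divmod and indexes base_anchors directly.
import Mathlib
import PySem

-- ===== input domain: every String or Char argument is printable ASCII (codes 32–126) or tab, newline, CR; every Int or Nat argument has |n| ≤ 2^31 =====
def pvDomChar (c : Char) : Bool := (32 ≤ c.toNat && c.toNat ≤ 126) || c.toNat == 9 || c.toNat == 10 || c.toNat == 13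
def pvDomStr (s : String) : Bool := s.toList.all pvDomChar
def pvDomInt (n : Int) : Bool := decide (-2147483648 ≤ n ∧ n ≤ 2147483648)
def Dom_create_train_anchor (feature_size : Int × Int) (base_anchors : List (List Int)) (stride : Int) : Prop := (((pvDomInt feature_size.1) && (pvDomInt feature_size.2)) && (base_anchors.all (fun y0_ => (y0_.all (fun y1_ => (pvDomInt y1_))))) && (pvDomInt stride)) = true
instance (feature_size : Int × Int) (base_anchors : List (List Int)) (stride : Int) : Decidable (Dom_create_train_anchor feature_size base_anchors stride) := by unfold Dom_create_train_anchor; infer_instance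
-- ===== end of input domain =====

-- B replaces A's three nested for-loops by one flat index loop that decodes (row, col, anchor) with divmod (objective: alternative).

-- ===== PORT A =====
-- a[i] for i in 0..3: Python raises IndexError when the anchor is shorter; ported with pyGet? + getD 0,
-- exact on Pre_ (which excludes the raising inputs).
def pvIdx (a : List Int) (i : Int) : Int := (PySem.List.pyGet? a i).getD 0

def create_train_anchor (feature_size : Int × Int) (base_anchors : List (List Int)) (stride : Int) : List (List Int) :=
  (PySem.List.pyRange 0 feature_size.1 1).foldl (fun anchors r =>
    (PySem.List.pyRange 0 feature_size.2 1).foldl (fun anchors c =>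
      base_anchors.foldl (fun anchors a =>
        anchors ++ [[
          c * stride + PySem.Int.floordiv stride 2 + pvIdx a 0,
          r * stride + PySem.Int.floordiv stride 2 + pvIdx a 1,
          c * stride + PySem.Int.floordiv stride 2 + pvIdx a 2,
          r * stride + PySem.Int.floordiv stride 2 + pvIdx a 3]]) anchors) anchors) []

-- ===== PORT B =====
-- base_anchors[k] with 0 ≤ k < len: ported with pyGet? + getD [], exact on Pre_.
def create_train_anchor_alt (feature_size : Int × Int) (base_anchors : List (List Int)) (stride : Int) : List (List Int) :=
  let rows := feature_size.1
  let cols := feature_size.2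
  let n : Int := base_anchors.length
  if rows ≤ 0 ∨ cols ≤ 0 ∨ n = 0 then []
  else
    let half := PySem.Int.floordiv stride 2
    let total := rows * cols * n
    (PySem.List.pyRange 0 total 1).foldl (fun out i =>
      let rest := PySem.Int.floordiv i n
      let k := PySem.Int.mod i n
      let r := PySem.Int.floordiv rest cols
      let c := PySem.Int.mod rest cols
      let a := (PySem.List.pyGet? base_anchors k).getD []
      let x := c * stride + half
      let y := r * stride + half
      out ++ [[x + pvIdx a 0, y + pvIdx a 1, x + pvIdx a 2, y + pvIdx a 3]]) []

-- ===== PRECONDITION & SPEC =====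
-- Pre_ excludes exactly the inputs where A raises IndexError: both grid dimensions positive and
-- some base anchor shorter than 4 entries (a[0..3] would raise).
def Pre_create_train_anchor (feature_size : Int × Int) (base_anchors : List (List Int)) (stride : Int) : Prop :=
  feature_size.1 ≤ 0 ∨ feature_size.2 ≤ 0 ∨ ∀ a ∈ base_anchors, 4 ≤ a.length
instance (feature_size : Int × Int) (base_anchors : List (List Int)) (stride : Int) : Decidable (Pre_create_train_anchor feature_size base_anchors stride) := by unfold Pre_create_train_anchor; infer_instance

def pvWitness_create_train_anchor : (Int × Int) × List (List Int) × Int := ((2, 2), [[-8, -8, 8, 8], [-4, -4, 4, 4]], 16)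

def Spec_create_train_anchor (feature_size : Int × Int) (base_anchors : List (List Int)) (stride : Int) (out : List (List Int)) : Prop := out = create_train_anchor_alt feature_size base_anchors stride
instance (feature_size : Int × Int) (base_anchors : List (List Int)) (stride : Int) (out : List (List Int)) : Decidable (Spec_create_train_anchor feature_size base_anchors stride out) := by unfold Spec_create_train_anchor; infer_instance

-- ===== CLAIM (what is proved, stated in full; the proofs are below) =====
def Claim_equal_create_train_anchor : Prop := ∀ (feature_size : Int × Int) (base_anchors : List (List Int)) (stride : Int), Dom_create_train_anchor feature_size base_anchors stride → Pre_create_train_anchor feature_size base_anchors stride → Spec_create_train_anchor feature_size base_anchors stride (create_train_anchor feature_size base_anchors stride)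

-- ===== LEMMAS AND PROOFS =====

-- Decoding a flat index over range (m*k) recovers the two nested ranges.
theorem range_mul_decode {β : Type} (m k : Nat) (f : Nat → Nat → β) :
    (List.range (m * k)).map (fun i => f (i / k) (i % k)) =
      (List.range m).flatMap (fun r => (List.range k).map (fun c => f r c)) := by
  induction m with
  | zero => simp
  | succ m ih =>
    rcases Nat.eq_zero_or_pos k with hk | hk
    · subst hk; simp
    · rw [Nat.succ_mul, List.range_add, List.map_append, ih, List.range_succ,
        List.flatMap_append]
      congr 1
      simp only [List.map_map, List.flatMap_cons, List.flatMap_nil, List.append_nil]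
      refine List.map_congr_left ?_
      intro j hj
      simp only [List.mem_range] at hj
      have h1 : (m * k + j) / k = m := by
        rw [Nat.mul_comm, Nat.mul_add_div hk, Nat.div_eq_of_lt hj]; omega
        -- closing arithmetic
        
      have h2 : (m * k + j) % k = j := by
        rw [Nat.mul_comm, Nat.mul_add_mod, Nat.mod_eq_of_lt hj]
      rw [Function.comp_apply, h1, h2]

theorem range_mul_decode_flatMap {β : Type} (m k : Nat) (f : Nat → Nat → List β) :
    (List.range (m * k)).flatMap (fun i => f (i / k) (i % k)) =
      (List.range m).flatMap (fun r => (List.range k).flatMap (fun c => f r c)) := by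
  have h := range_mul_decode m k f
  calc (List.range (m * k)).flatMap (fun i => f (i / k) (i % k))
      = ((List.range (m * k)).map (fun i => f (i / k) (i % k))).flatten := by
        rw [List.flatMap_def]
    _ = ((List.range m).flatMap (fun r => (List.range k).map (fun c => f r c))).flatten := by
        rw [h]
    _ = _ := by
        simp only [List.flatMap_def, List.flatten_flatten, List.map_map]
        rfl

-- map over range (length) of a getElem-style access is map over the list
theorem map_range_get {α β : Type} (xs : List α) (f : α → β) (g : Nat → α)
    (hg : ∀ i, (h : i < xs.length) → g i = xs[i]) :
    (List.range xs.length).map (fun i => f (g i)) = xs.map f := by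
  apply List.ext_getElem
  · simp
  · intro i h1 h2
    simp only [List.getElem_map, List.getElem_range]
    rw [hg i (by simpa using h1)]

theorem flatMap_single {α β : Type} (f : α → β) (l : List α) :
    l.flatMap (fun x => [f x]) = l.map f := by
  induction l with
  | nil => rfl
  | cons h t ih => simp [List.flatMap_cons, ih]

-- the box emitted for grid cell (r, c) and base anchor a (shared shape of both ports' bodies)
def pvBox (stride r c : Int) (a : List Int) : List Int :=
  [c * stride + PySem.Int.floordiv stride 2 + pvIdx a 0,
   r * stride + PySem.Int.floordiv stride 2 + pvIdx a 1,
   c * stride + PySem.Int.floordiv stride 2 + pvIdx a 2,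
   r * stride + PySem.Int.floordiv stride 2 + pvIdx a 3]

theorem key (bas : List (List Int)) (stride : Int) (R C : Nat) :
    (List.range (R * C * bas.length)).flatMap (fun i =>
        [pvBox stride (↑(i / bas.length / C)) (↑(i / bas.length % C))
          ((bas[i % bas.length]?).getD [])]) =
      (List.range R).flatMap (fun (r : Nat) => (List.range C).flatMap (fun (c : Nat) =>
        bas.flatMap (fun a => [pvBox stride (↑r) (↑c) a]))) := by
  calc (List.range (R * C * bas.length)).flatMap (fun i =>
          [pvBox stride (↑(i / bas.length / C)) (↑(i / bas.length % C))
            ((bas[i % bas.length]?).getD [])])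
      = (List.range (R * C)).flatMap (fun rest => (List.range bas.length).flatMap (fun (k : Nat) =>
          [pvBox stride (↑(rest / C)) (↑(rest % C)) ((bas[k]?).getD [])])) :=
        range_mul_decode_flatMap (R * C) bas.length
          (fun rest k => [pvBox stride (↑(rest / C)) (↑(rest % C)) ((bas[k]?).getD [])])
    _ = (List.range R).flatMap (fun (r : Nat) => (List.range C).flatMap (fun (c : Nat) =>
          (List.range bas.length).flatMap (fun (k : Nat) =>
            [pvBox stride (↑r) (↑c) ((bas[k]?).getD [])]))) :=
        range_mul_decode_flatMap R C
          (fun r c => (List.range bas.length).flatMap (fun (k : Nat) =>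
            [pvBox stride (↑r) (↑c) ((bas[k]?).getD [])]))
    _ = _ := by
        refine List.flatMap_congr ?_ ; intro r _
        refine List.flatMap_congr ?_ ; intro c _
        rw [flatMap_single, flatMap_single]
        exact map_range_get bas _ (fun k => (bas[k]?).getD [])
          (fun i h => by show (bas[i]?).getD [] = bas[i]; rw [List.getElem?_eq_getElem h]; rfl)

-- ===== VERDICT (by name: the statement is the Claim_ definition above) =====
theorem create_train_anchor_spec : Claim_equal_create_train_anchor := by
  intro fs bas stride _ hpre
  obtain ⟨rows, cols⟩ := fs
  unfold Spec_create_train_anchor create_train_anchor create_train_anchor_alt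
  by_cases hdeg : rows ≤ 0 ∨ cols ≤ 0 ∨ (bas.length : Int) = 0
  · rw [if_pos hdeg]
    rcases hdeg with h | h | h
    · rw [show PySem.List.pyRange 0 rows 1 = [] from PySem.List.pyRange_one_eq_nil h]
      rfl
    · rw [show PySem.List.pyRange 0 cols 1 = [] from PySem.List.pyRange_one_eq_nil h]
      simp only [List.foldl_nil, List.foldl_fixed]
    · have hb : bas = [] := List.length_eq_zero_iff.mp (by exact_mod_cast h)
      subst hb
      simp only [List.foldl_nil, List.foldl_fixed]
  · rw [if_neg hdeg]
    push Not at hdeg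
    obtain ⟨h1, h2, h3⟩ := hdeg
    obtain ⟨R, rfl⟩ : ∃ R : Nat, rows = (R : Int) :=
      ⟨rows.toNat, (Int.toNat_of_nonneg (by omega)).symm⟩
    obtain ⟨C, rfl⟩ : ∃ C : Nat, cols = (C : Int) :=
      ⟨cols.toNat, (Int.toNat_of_nonneg (by omega)).symm⟩
    simp only [PySem.List.foldl_append_eq_flatMap, List.nil_append]
    rw [show (R : Int) * C * (bas.length : Int) = ((R * C * bas.length : Nat) : Int) by
      push_cast; ring]
    simp only [PySem.List.pyRange_zero_natCast, List.flatMap_map,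
      PySem.Int.floordiv_natCast, PySem.Int.mod_natCast, PySem.List.pyGet?_natCast]
    exact (key bas stride R C).symm
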